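-- pv_equiv track=rewrite | github.com/mkesani1/slidearabi | font_manager.py | _strip_weight_suffix
-- ===== SOURCE A (Python) =====
-- from typing import Dict, List, Optional, Set, Tuple
--
-- WEIGHT_STYLE_SUFFIXES: List[str] = [
--     "hairline", "thin", "ultralight", "extra light", "extralight",
--     "light", "regular", "normal", "book",
--     "medium", "demi", "semibold", "semi bold", "demibold",
--     "bold", "extrabold", "extra bold", "ultrabold", "ultra bold",
--     "black", "heavy", "poster",
--     "condensed", "cond", "expanded", "extended",
--     "italic", "oblique", "slanted",
--     "narrow", "wide",
-- ]
--
-- def _strip_weight_suffix(family_name: str) -> str: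
--     """Strip trailing weight/style words from a font family name.
--
--     E.g. "Roboto Black" → "Roboto", "Open Sans Light" → "Open Sans"
--     """
--     parts = family_name.split()
--     while parts:
--         lower_last = parts[-1].lower()
--         if lower_last in WEIGHT_STYLE_SUFFIXES:
--             parts = parts[:-1]
--         else:
--             break
--     return " ".join(parts) if parts else family_name
-- ===== SOURCE B (Python) =====
-- from typing import List
--
-- WEIGHT_STYLE_SUFFIXES: List[str] = [
--     "hairline", "thin", "ultralight", "extra light", "extralight",
--     "light", "regular", "normal", "book",
--     "medium", "demi", "semibold", "semi bold", "demibold",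
--     "bold", "extrabold", "extra bold", "ultrabold", "ultra bold",
--     "black", "heavy", "poster",
--     "condensed", "cond", "expanded", "extended",
--     "italic", "oblique", "slanted",
--     "narrow", "wide",
-- ]
--
-- def _strip_weight_suffix(family_name: str) -> str:
--     """Strip trailing weight/style words from a font family name (single forward pass)."""
--     parts = family_name.split()
--     last_idx = -1
--     for i, word in enumerate(parts):
--         if word.lower() not in WEIGHT_STYLE_SUFFIXES:
--             last_idx = i
--     kept = parts[:last_idx + 1]
--     return " ".join(kept) if kept else family_name
-- ===== Notes on version B (the rewrite author's own statement) =====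
-- stated objective: alternative
-- what changed: Replaces A's backwards while-loop that repeatedly drops and re-tests the last word with one forward enumerate pass recording the index of the last non-suffix word, then a single slice.
import Mathlib
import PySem

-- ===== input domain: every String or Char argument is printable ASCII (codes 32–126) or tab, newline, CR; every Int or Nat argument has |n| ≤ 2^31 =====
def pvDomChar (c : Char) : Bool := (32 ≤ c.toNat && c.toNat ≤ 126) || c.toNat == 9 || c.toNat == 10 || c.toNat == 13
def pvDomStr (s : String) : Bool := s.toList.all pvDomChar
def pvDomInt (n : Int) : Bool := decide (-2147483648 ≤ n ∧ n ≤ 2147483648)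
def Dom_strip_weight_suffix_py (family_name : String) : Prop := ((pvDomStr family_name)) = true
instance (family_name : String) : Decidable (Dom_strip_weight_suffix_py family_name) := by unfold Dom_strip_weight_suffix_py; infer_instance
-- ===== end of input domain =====

-- B replaces A's backwards drop-and-retest while-loop by one forward enumerate pass
-- recording the last non-suffix index, then a single slice (objective: alternative).

-- ===== PORT A =====
def WEIGHT_STYLE_SUFFIXES : List String :=
  ["hairline", "thin", "ultralight", "extra light", "extralight",
   "light", "regular", "normal", "book",
   "medium", "demi", "semibold", "semi bold", "demibold",
   "bold", "extrabold", "extra bold", "ultrabold", "ultra bold",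
   "black", "heavy", "poster",
   "condensed", "cond", "expanded", "extended",
   "italic", "oblique", "slanted",
   "narrow", "wide"]

-- the 'while parts:' loop of A: test parts[-1].lower(), drop with parts[:-1]
def pvStripLoop (parts : List String) : List String :=
  if h : parts = [] then parts
  else
    let lower_last := PySem.Str.lower (parts.getLast h)
    if WEIGHT_STYLE_SUFFIXES.contains lower_last then
      pvStripLoop (PySem.List.slice parts none (some (-1)))
    else parts
termination_by parts.length
decreasing_by
  simp only [PySem.List.slice_to_neg_one, List.length_dropLast]
  have := List.length_pos_of_ne_nil h
  omega

def strip_weight_suffix_py (family_name : String) : String :=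
  let parts := PySem.Str.split₀ family_name
  let parts := pvStripLoop parts
  if parts ≠ [] then PySem.Str.join " " parts else family_name

-- ===== PORT B =====
-- Source B's for-loop over enumerate(parts): last index whose lowercased word is not a suffix, else -1
def pvLastIdx (parts : List String) : Int :=
  (PySem.List.enumerate parts).foldl
    (fun acc iw => if WEIGHT_STYLE_SUFFIXES.contains (PySem.Str.lower iw.2) then acc else iw.1)
    (-1)

def strip_weight_suffix_py_alt (family_name : String) : String :=
  let parts := PySem.Str.split₀ family_name
  let last_idx : Int := pvLastIdx parts
  let kept := PySem.List.slice parts none (some (last_idx + 1))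
  if kept ≠ [] then PySem.Str.join " " kept else family_name

-- ===== PRECONDITION & SPEC =====
def Spec_strip_weight_suffix_py (family_name : String) (out : String) : Prop := out = strip_weight_suffix_py_alt family_name
instance (family_name : String) (out : String) : Decidable (Spec_strip_weight_suffix_py family_name out) := by unfold Spec_strip_weight_suffix_py; infer_instance

-- ===== CLAIM (what is proved, stated in full; the proofs are below) =====
def Claim_equal_strip_weight_suffix_py : Prop := ∀ (family_name : String), Dom_strip_weight_suffix_py family_name → Spec_strip_weight_suffix_py family_name (strip_weight_suffix_py family_name)

-- ===== LEMMAS AND PROOFS =====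

theorem pvLastIdx_concat (xs : List String) (x : String) :
    pvLastIdx (xs ++ [x]) =
      if WEIGHT_STYLE_SUFFIXES.contains (PySem.Str.lower x) then pvLastIdx xs
      else (xs.length : Int) := by
  simp [pvLastIdx, PySem.List.enumerate_append, List.foldl_append, PySem.List.enumerate]

theorem pvLastIdx_bounds (xs : List String) :
    -1 ≤ pvLastIdx xs ∧ pvLastIdx xs < xs.length := by
  induction xs using List.reverseRecOn with
  | nil => simp [pvLastIdx, PySem.List.enumerate]
  | append_singleton xs x ih =>
    rw [pvLastIdx_concat]
    simp only [List.length_append, List.length_singleton]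
    split_ifs <;> push_cast <;> omega

theorem pvStripLoop_eq_take (xs : List String) :
    pvStripLoop xs = xs.take ((pvLastIdx xs + 1).toNat) := by
  induction xs using List.reverseRecOn with
  | nil => simp [pvStripLoop]
  | append_singleton xs x ih =>
    rw [pvStripLoop]
    have hne : xs ++ [x] ≠ [] := by simp
    rw [dif_neg hne]
    have hlast : (xs ++ [x]).getLast hne = x := by simp
    simp only [hlast, PySem.List.slice_to_neg_one, List.dropLast_concat, pvLastIdx_concat]
    split_ifs with hmem
    · rw [ih]
      have hb := pvLastIdx_bounds xs
      rw [List.take_append_of_le_length (by omega)]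
    · have : ((xs.length : Int) + 1).toNat = xs.length + 1 := by omega
      rw [this, List.take_of_length_le (by simp)]

-- ===== VERDICT (by name: the statement is the Claim_ definition above) =====
theorem strip_weight_suffix_py_spec : Claim_equal_strip_weight_suffix_py := by
  intro family_name _
  have hb := pvLastIdx_bounds (PySem.Str.split₀ family_name)
  simp only [Spec_strip_weight_suffix_py, strip_weight_suffix_py, strip_weight_suffix_py_alt]
  rw [PySem.List.slice_to _ (by omega), pvStripLoop_eq_take]
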